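-- pv_equiv track=rewrite | github.com/bernardo-maltez/DbManager | src/DbManagerCli/dbmanager.py | db_entry_update
-- ===== SOURCE A (Python) =====
-- from typing import List, Dict, Any
--
-- def db_entry_update(entry_data: Dict, db_data: Dict, media_type: str, old_status: str, new_status: str) -> Dict:
--     # Remove the entry from the old status
--     for status_dict in db_data[media_type]:
--         if old_status in status_dict:
--             status_dict[old_status] = [entry for entry in status_dict[old_status] if entry['title'] != entry_data['title']]
--
--     # Add the entry to the new status
--     for status_dict in db_data[media_type]:
--         if new_status in status_dict:
--             status_dict[new_status].append(entry_data)
--             break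
--     else:
--         raise ValueError(f"Category with media_status {new_status} not found")
--
--     return db_data
-- ===== SOURCE B (Python) =====
-- def db_entry_update(entry_data, db_data, media_type, old_status, new_status):
--     cats = db_data[media_type]
--     # Stage 1: locate the first category dict that has the new status.
--     try:
--         idx = next(i for i, d in enumerate(cats) if new_status in d)
--     except StopIteration:
--         raise ValueError(f"Category with media_status {new_status} not found")
--
--     # Stage 2: rebuild every category dict in one indexed comprehension.
--     def upd(i, d):
--         d = dict(d)
--         if old_status in d:
--             d[old_status] = [e for e in d[old_status] if e['title'] != entry_data['title']]
--         if i == idx: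
--             d[new_status] = d[new_status] + [entry_data]
--         return d
--
--     return {**db_data, media_type: [upd(i, d) for i, d in enumerate(cats)]}
-- ===== Notes on version B (the rewrite author's own statement) =====
-- stated objective: alternative
-- what changed: B replaces A's two mutating passes with a locate-then-rebuild decomposition: it first finds the index of the first category dict containing new_status (raising ValueError if none), then rebuilds the whole category list in one indexed comprehension that filters old_status everywhere and appends entry_data exactly at that index, returning a fresh dict instead of mutating db_data in place.
import Mathlib
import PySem

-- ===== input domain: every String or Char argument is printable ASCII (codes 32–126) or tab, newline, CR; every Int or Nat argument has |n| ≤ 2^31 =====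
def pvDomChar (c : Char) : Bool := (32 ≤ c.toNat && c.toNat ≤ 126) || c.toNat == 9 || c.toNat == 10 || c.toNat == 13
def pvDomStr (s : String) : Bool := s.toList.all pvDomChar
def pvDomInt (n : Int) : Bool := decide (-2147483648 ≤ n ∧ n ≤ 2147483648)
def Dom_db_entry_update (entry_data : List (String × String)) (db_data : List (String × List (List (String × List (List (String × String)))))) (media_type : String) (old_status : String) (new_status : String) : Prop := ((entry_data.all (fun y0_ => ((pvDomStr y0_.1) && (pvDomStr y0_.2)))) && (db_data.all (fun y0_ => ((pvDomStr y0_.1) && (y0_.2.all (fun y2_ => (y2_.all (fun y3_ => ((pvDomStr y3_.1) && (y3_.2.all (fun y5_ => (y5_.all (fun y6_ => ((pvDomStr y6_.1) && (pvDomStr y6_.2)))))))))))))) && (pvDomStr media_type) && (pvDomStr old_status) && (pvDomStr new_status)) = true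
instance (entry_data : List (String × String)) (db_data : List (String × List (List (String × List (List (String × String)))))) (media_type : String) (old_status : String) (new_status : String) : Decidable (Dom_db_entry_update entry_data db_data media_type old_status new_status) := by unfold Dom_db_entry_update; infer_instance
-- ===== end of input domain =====

-- ===== PORT A =====
-- B is a locate-then-rebuild re-implementation of A (find the index of the first category dict with
-- new_status, then rebuild the category list in one indexed pass); A mutates its db_data argument in
-- place while B rebuilds, so the equivalence proved here is about the RETURN value only.

-- shared transliteration of the Python line
-- `d[old_status] = [e for e in d[old_status] if e['title'] != entry_data['title']]` (guarded by `old_status in d`),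
-- which occurs verbatim in both Source A and Source B
def pvFilterOld (entry_data : List (String × String)) (old_status : String) (d : List (String × List (List (String × String)))) : List (String × List (List (String × String))) :=
  if (PySem.Dict.mk d).contains old_status then
    ((PySem.Dict.mk d).insert old_status
      (((PySem.Dict.mk d).getD old_status []).filter
        (fun e => (PySem.Dict.mk e).getD "title" "" ≠ (PySem.Dict.mk entry_data).getD "title" ""))).items
  else d

-- shared transliteration of appending entry_data to d[new_status] (Source A's `.append`, Source B's `+ [entry_data]`)
def pvAppendNew (entry_data : List (String × String)) (new_status : String) (d : List (String × List (List (String × String)))) : List (String × List (List (String × String))) :=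
  ((PySem.Dict.mk d).insert new_status ((PySem.Dict.mk d).getD new_status [] ++ [entry_data])).items

-- A's second loop: append entry_data to the FIRST status_dict containing new_status; none = ValueError
def pvA_addNew (entry_data : List (String × String)) (new_status : String) : List (List (String × List (List (String × String)))) → Option (List (List (String × List (List (String × String)))))
  | [] => none
  | d :: rest =>
    if (PySem.Dict.mk d).contains new_status then some (pvAppendNew entry_data new_status d :: rest)
    else (pvA_addNew entry_data new_status rest).map (d :: ·)

def db_entry_update (entry_data : List (String × String)) (db_data : List (String × List (List (String × List (List (String × String)))))) (media_type : String) (old_status : String) (new_status : String) : List (String × List (List (String × List (List (String × String))))) :=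
  match (PySem.Dict.mk db_data).get? media_type with
  | none => db_data  -- KeyError; excluded by Pre_
  | some L =>
    -- first loop: remove entry from old status in every status_dict
    let L1 := L.map (pvFilterOld entry_data old_status)
    -- second loop with for/else
    match pvA_addNew entry_data new_status L1 with
    | none => db_data  -- ValueError; excluded by Pre_
    | some L2 => ((PySem.Dict.mk db_data).insert media_type L2).items

-- ===== PORT B =====
-- `upd(i, d)` of Source B: filter old_status, and append entry_data iff i == idx
def pvB_upd (entry_data : List (String × String)) (old_status new_status : String) (idx i : Nat) (d : List (String × List (List (String × String)))) : List (String × List (List (String × String))) :=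
  let d1 := pvFilterOld entry_data old_status d
  if i = idx then pvAppendNew entry_data new_status d1 else d1

-- `[upd(i, d) for i, d in enumerate(cats)]`: indexed rebuild with a running counter
def pvB_build (entry_data : List (String × String)) (old_status new_status : String) (idx : Nat) : List (List (String × List (List (String × String)))) → Nat → List (List (String × List (List (String × String))))
  | [], _ => []
  | d :: rest, i => pvB_upd entry_data old_status new_status idx i d :: pvB_build entry_data old_status new_status idx rest (i + 1)

def db_entry_update_alt (entry_data : List (String × String)) (db_data : List (String × List (List (String × List (List (String × String)))))) (media_type : String) (old_status : String) (new_status : String) : List (String × List (List (String × List (List (String × String))))) :=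
  match (PySem.Dict.mk db_data).get? media_type with
  | none => db_data  -- KeyError; excluded by Pre_
  | some L =>
    -- stage 1: `next(i for i, d in enumerate(cats) if new_status in d)`
    match L.findIdx? (fun d => (PySem.Dict.mk d).contains new_status) with
    | none => db_data  -- StopIteration → ValueError; excluded by Pre_
    | some idx =>
      -- stage 2: one indexed rebuild
      ((PySem.Dict.mk db_data).insert media_type (pvB_build entry_data old_status new_status idx L 0)).items

-- ===== PRECONDITION & SPEC =====
-- Pre_ = exactly the inputs on which Python A returns: media_type is a key of db_data (else KeyError),
-- every entry scanned by the removal comprehension has a 'title' key and entry_data has one whenever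
-- that comprehension runs on a nonempty list (else KeyError), and some status_dict contains new_status
-- (else ValueError).
def Pre_db_entry_update (entry_data : List (String × String)) (db_data : List (String × List (List (String × List (List (String × String)))))) (media_type : String) (old_status : String) (new_status : String) : Prop :=
  (PySem.Dict.mk db_data).contains media_type = true ∧
  (∀ d ∈ (PySem.Dict.mk db_data).getD media_type [],
    (PySem.Dict.mk d).contains old_status = true →
      (∀ e ∈ (PySem.Dict.mk d).getD old_status [], (PySem.Dict.mk e).contains "title" = true) ∧
      ((PySem.Dict.mk d).getD old_status [] ≠ [] → (PySem.Dict.mk entry_data).contains "title" = true)) ∧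
  (∃ d ∈ (PySem.Dict.mk db_data).getD media_type [], (PySem.Dict.mk d).contains new_status = true)
instance (entry_data : List (String × String)) (db_data : List (String × List (List (String × List (List (String × String)))))) (media_type : String) (old_status : String) (new_status : String) : Decidable (Pre_db_entry_update entry_data db_data media_type old_status new_status) := by unfold Pre_db_entry_update; infer_instance

def pvWitness_db_entry_update : (List (String × String)) × (List (String × List (List (String × List (List (String × String)))))) × String × String × String :=
  ([("title", "x")], [("movie", [[("todo", [[("title", "x")]]), ("done", [])]])], "movie", "todo", "done")

def Spec_db_entry_update (entry_data : List (String × String)) (db_data : List (String × List (List (String × List (List (String × String)))))) (media_type : String) (old_status : String) (new_status : String) (out : List (String × List (List (String × List (List (String × String)))))) : Prop := out = db_entry_update_alt entry_data db_data media_type old_status new_status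
instance (entry_data : List (String × String)) (db_data : List (String × List (List (String × List (List (String × String)))))) (media_type : String) (old_status : String) (new_status : String) (out : List (String × List (List (String × List (List (String × String)))))) : Decidable (Spec_db_entry_update entry_data db_data media_type old_status new_status out) := by
  unfold Spec_db_entry_update
  letI b : DecidableEq (List (String × String)) := inferInstance
  letI e : DecidableEq (List (String × List (List (String × String)))) := inferInstance
  letI h : DecidableEq (List (String × List (List (String × List (List (String × String)))))) := inferInstance
  exact h out (db_entry_update_alt entry_data db_data media_type old_status new_status)

-- ===== CLAIM (what is proved, stated in full; the proofs are below) =====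
def Claim_equal_db_entry_update : Prop := ∀ (entry_data : List (String × String)) (db_data : List (String × List (List (String × List (List (String × String)))))) (media_type : String) (old_status : String) (new_status : String), Dom_db_entry_update entry_data db_data media_type old_status new_status → Pre_db_entry_update entry_data db_data media_type old_status new_status → Spec_db_entry_update entry_data db_data media_type old_status new_status (db_entry_update entry_data db_data media_type old_status new_status)

-- ===== LEMMAS AND PROOFS =====

-- filtering the old-status list never changes which keys a status_dict has
lemma contains_pvFilterOld (entry_data : List (String × String)) (old_status k : String) (d : List (String × List (List (String × String)))) :
    (PySem.Dict.mk (pvFilterOld entry_data old_status d)).contains k = (PySem.Dict.mk d).contains k := by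
  unfold pvFilterOld
  split
  · rename_i h
    rw [show (PySem.Dict.mk ((PySem.Dict.mk d).insert old_status (((PySem.Dict.mk d).getD old_status []).filter (fun e => (PySem.Dict.mk e).getD "title" "" ≠ (PySem.Dict.mk entry_data).getD "title" ""))).items) = (PySem.Dict.mk d).insert old_status (((PySem.Dict.mk d).getD old_status []).filter (fun e => (PySem.Dict.mk e).getD "title" "" ≠ (PySem.Dict.mk entry_data).getD "title" "")) from rfl]
    rw [PySem.Dict.contains_insert]
    cases hk : (k == old_status)
    · simp
    · simp at hk; subst hk; simp [h]
  · rfl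

-- B's counter only enters through its difference to idx
lemma pvB_build_shift (entry_data : List (String × String)) (old_status new_status : String) (idx : Nat)
    (L : List (List (String × List (List (String × String))))) (i : Nat) :
    pvB_build entry_data old_status new_status (idx + 1) L (i + 1) =
      pvB_build entry_data old_status new_status idx L i := by
  induction L generalizing i with
  | nil => rfl
  | cons d rest ih =>
    unfold pvB_build pvB_upd
    rw [ih]
    congr 1
    simp

-- past the hit index, B's rebuild is exactly A's removal pass
lemma pvB_build_past (entry_data : List (String × String)) (old_status new_status : String) (idx : Nat)
    (L : List (List (String × List (List (String × String))))) (i : Nat) (h : idx < i) :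
    pvB_build entry_data old_status new_status idx L i = L.map (pvFilterOld entry_data old_status) := by
  induction L generalizing i with
  | nil => rfl
  | cons d rest ih =>
    unfold pvB_build pvB_upd
    rw [ih (i + 1) (Nat.lt_succ_of_lt h)]
    simp [Nat.ne_of_gt h]

-- the fusion lemma: A's removal pass followed by A's append loop equals B's locate-then-rebuild
lemma addNew_eq_build (entry_data : List (String × String)) (old_status new_status : String)
    (L : List (List (String × List (List (String × String))))) :
    pvA_addNew entry_data new_status (L.map (pvFilterOld entry_data old_status)) =
      (L.findIdx? (fun d => (PySem.Dict.mk d).contains new_status)).map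
        (fun idx => pvB_build entry_data old_status new_status idx L 0) := by
  induction L with
  | nil => rfl
  | cons d rest ih =>
    rw [List.map_cons, List.findIdx?_cons]
    by_cases hd : (PySem.Dict.mk d).contains new_status = true
    · have hfd : (PySem.Dict.mk (pvFilterOld entry_data old_status d)).contains new_status = true := by
        rw [contains_pvFilterOld]; exact hd
      unfold pvA_addNew
      simp only [hfd, if_true, hd, Option.map_some]
      unfold pvB_build pvB_upd
      rw [pvB_build_past entry_data old_status new_status 0 rest 1 Nat.zero_lt_one]
      simp
    · have hfd : ¬ (PySem.Dict.mk (pvFilterOld entry_data old_status d)).contains new_status = true := by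
        rw [contains_pvFilterOld]; exact hd
      unfold pvA_addNew
      simp only [hfd, Bool.false_eq_true, if_false, hd, ih, Option.map_map]
      apply congrArg (fun f => Option.map f _)
      funext idx
      show pvFilterOld entry_data old_status d ::
          pvB_build entry_data old_status new_status idx rest 0 =
        pvB_build entry_data old_status new_status (idx + 1) (d :: rest) 0
      have hc : pvB_build entry_data old_status new_status (idx + 1) (d :: rest) 0 =
          pvB_upd entry_data old_status new_status (idx + 1) 0 d ::
            pvB_build entry_data old_status new_status (idx + 1) rest 1 := rfl
      rw [hc, pvB_build_shift]
      simp [pvB_upd]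

-- ===== VERDICT (by name: the statement is the Claim_ definition above) =====
theorem db_entry_update_spec : Claim_equal_db_entry_update := by
  intro entry_data db_data media_type old_status new_status _ hPre
  obtain ⟨h1, _, h3⟩ := hPre
  unfold Spec_db_entry_update db_entry_update db_entry_update_alt
  have hsome : ((PySem.Dict.mk db_data).get? media_type).isSome := by
    rw [← PySem.Dict.contains_eq_isSome_get?]; exact h1
  obtain ⟨L, hL⟩ := Option.isSome_iff_exists.mp hsome
  have hgetD : (PySem.Dict.mk db_data).getD media_type [] = L :=
    PySem.Dict.getD_of_get?_eq_some _ _ hL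
  rw [hL]
  dsimp only
  have hfind : (L.findIdx? (fun d => (PySem.Dict.mk d).contains new_status)).isSome := by
    rw [List.findIdx?_isSome]
    rcases h3 with ⟨d, hm, hc⟩
    rw [hgetD] at hm
    exact List.any_eq_true.mpr ⟨d, hm, hc⟩
  obtain ⟨idx, hidx⟩ := Option.isSome_iff_exists.mp hfind
  rw [addNew_eq_build, hidx]
  rfl
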